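-- pv_equiv track=rewrite | github.com/oss-esso/OQI-UC002-DWave | Benchmarks/decomposition_scaling/benchmark_decomposition_scaling.py | rotation_partition_spatial_temporal
-- ===== SOURCE A (Python) =====
-- from typing import Dict, List, Tuple, Set
--
-- FAMILIES_6 = ["Fruits", "Grains", "Legumes", "Leafy_Vegetables",
--               "Root_Vegetables", "Proteins"]
--
-- N_PERIODS = 3
--
-- def rotation_partition_spatial_temporal(
--         farm_names: List[str], farms_per_cluster: int = 5) -> List[Set[str]]:
--     """Spatial-temporal decomposition: cluster farms × period slices."""
--     parts: List[Set[str]] = []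
--     for i in range(0, len(farm_names), farms_per_cluster):
--         cluster = farm_names[i:i + farms_per_cluster]
--         for t in range(1, N_PERIODS + 1):
--             parts.append({f"Y_{f}_{fam}_t{t}"
--                           for f in cluster for fam in FAMILIES_6})
--     return parts
-- ===== SOURCE B (Python) =====
-- from typing import List, Set
--
-- FAMILIES_6 = ["Fruits", "Grains", "Legumes", "Leafy_Vegetables",
--               "Root_Vegetables", "Proteins"]
--
-- N_PERIODS = 3
--
-- def rotation_partition_spatial_temporal(
--         farm_names: List[str], farms_per_cluster: int = 5) -> List[Set[str]]:
--     """Two-stage decomposition: recursively split the farm list into chunks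
--     (no index arithmetic), then one flat comprehension stamps the periods."""
--     if farms_per_cluster <= 0:
--         return []  # non-positive chunk size yields no clusters
--
--     def chunks(rest: List[str]) -> List[List[str]]:
--         if not rest:
--             return []
--         return [rest[:farms_per_cluster]] + chunks(rest[farms_per_cluster:])
--
--     return [{f"Y_{f}_{fam}_t{t}" for f in c for fam in FAMILIES_6}
--             for c in chunks(farm_names)
--             for t in range(1, N_PERIODS + 1)]
-- ===== Notes on version B (the rewrite author's own statement) =====
-- stated objective: alternative
-- what changed: B replaces A's single index-range loop with two stages: a recursion on the list structure (take/drop) that builds the cluster list with no index arithmetic, followed by one flat comprehension over clusters x periods; A instead re-slices farm_names by index inside an imperative append loop.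
import Mathlib
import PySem

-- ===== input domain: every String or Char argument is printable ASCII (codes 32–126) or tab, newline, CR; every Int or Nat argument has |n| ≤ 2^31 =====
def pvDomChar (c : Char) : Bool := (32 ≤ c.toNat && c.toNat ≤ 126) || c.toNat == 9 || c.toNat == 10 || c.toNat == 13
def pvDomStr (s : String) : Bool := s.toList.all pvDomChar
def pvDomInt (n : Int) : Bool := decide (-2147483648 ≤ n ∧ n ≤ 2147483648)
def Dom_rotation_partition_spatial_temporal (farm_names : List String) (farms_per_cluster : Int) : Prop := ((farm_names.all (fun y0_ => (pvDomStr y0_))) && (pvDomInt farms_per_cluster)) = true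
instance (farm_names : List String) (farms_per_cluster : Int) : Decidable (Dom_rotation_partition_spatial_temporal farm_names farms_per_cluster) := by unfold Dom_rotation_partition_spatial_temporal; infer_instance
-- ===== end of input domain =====

-- B replaces A's index-range loop with a recursion on the list structure building the cluster
-- list, followed by one flat pass over clusters × periods (alternative decomposition, same cost).

def FAMILIES_6 : List String := ["Fruits", "Grains", "Legumes", "Leafy_Vegetables", "Root_Vegetables", "Proteins"]

-- ===== PORT A =====
def rotation_partition_spatial_temporal (farm_names : List String) (farms_per_cluster : Int) : List (List String) :=
  (PySem.List.pyRange 0 (PySem.List.len farm_names) farms_per_cluster).foldl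
    (fun parts i =>
      let cluster := PySem.List.slice farm_names (some i) (some (i + farms_per_cluster))
      (PySem.List.pyRange 1 (3 + 1) 1).foldl
        (fun parts t =>
          parts ++ [PySem.Set.ofList (cluster.flatMap (fun f =>
            FAMILIES_6.map (fun fam => "Y_" ++ f ++ "_" ++ fam ++ "_t" ++ PySem.Int.toStr t)))])
        parts)
    []

-- ===== PORT B =====
-- chunks(rest): rest[:fpc] / rest[fpc:] for fpc > 0 are exactly take/drop of fpc.toNat;
-- we pass p = fpc.toNat - 1 so that the chunk size p+1 makes the recursion visibly terminating.
def pvChunks (p : Nat) : List String → List (List String)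
  | [] => []
  | x :: rest => ((x :: rest).take (p + 1)) :: pvChunks p ((x :: rest).drop (p + 1))
termination_by l => l.length
decreasing_by simp

def rotation_partition_spatial_temporal_alt (farm_names : List String) (farms_per_cluster : Int) : List (List String) :=
  if farms_per_cluster ≤ 0 then []
  else
    (pvChunks (farms_per_cluster.toNat - 1) farm_names).flatMap (fun c =>
      (PySem.List.pyRange 1 (3 + 1) 1).map (fun t =>
        PySem.Set.ofList (c.flatMap (fun f =>
          FAMILIES_6.map (fun fam => "Y_" ++ f ++ "_" ++ fam ++ "_t" ++ PySem.Int.toStr t)))))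

-- ===== PRECONDITION & SPEC =====
-- Pre_ excludes exactly farms_per_cluster = 0, on which Python's range(0, len, 0) raises ValueError in A.
def Pre_rotation_partition_spatial_temporal (farm_names : List String) (farms_per_cluster : Int) : Prop := farms_per_cluster ≠ 0
instance (farm_names : List String) (farms_per_cluster : Int) : Decidable (Pre_rotation_partition_spatial_temporal farm_names farms_per_cluster) := by unfold Pre_rotation_partition_spatial_temporal; infer_instance
def pvWitness_rotation_partition_spatial_temporal : List String × Int := (["a", "b", "c"], 2)

def Spec_rotation_partition_spatial_temporal (farm_names : List String) (farms_per_cluster : Int) (out : List (List String)) : Prop := out = rotation_partition_spatial_temporal_alt farm_names farms_per_cluster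
instance (farm_names : List String) (farms_per_cluster : Int) (out : List (List String)) : Decidable (Spec_rotation_partition_spatial_temporal farm_names farms_per_cluster out) := by unfold Spec_rotation_partition_spatial_temporal; infer_instance

-- ===== CLAIM (what is proved, stated in full; the proofs are below) =====
def Claim_equal_rotation_partition_spatial_temporal : Prop := ∀ (farm_names : List String) (farms_per_cluster : Int), Dom_rotation_partition_spatial_temporal farm_names farms_per_cluster → Pre_rotation_partition_spatial_temporal farm_names farms_per_cluster → Spec_rotation_partition_spatial_temporal farm_names farms_per_cluster (rotation_partition_spatial_temporal farm_names farms_per_cluster)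

-- ===== LEMMAS AND PROOFS =====

-- a positive-step range from 0 is empty for a non-positive stop
lemma pyRange_pos_nil (k n : Int) (hk : 0 < k) (hn : n ≤ 0) :
    PySem.List.pyRange 0 n k = [] := by
  rw [PySem.List.pyRange_of_pos _ _ hk, if_neg (by omega)]
  simp

-- peel one step off a positive-step range from 0
lemma pyRange_pos_cons (k n : Int) (hk : 0 < k) (hn : 0 < n) :
    PySem.List.pyRange 0 n k = 0 :: (PySem.List.pyRange 0 (n - k) k).map (· + k) := by
  rw [PySem.List.pyRange_of_pos _ _ hk, PySem.List.pyRange_of_pos _ _ hk,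
      if_pos (by omega)]
  have hcount : ((n - 0 + k - 1) / k) = ((if 0 < n - k then ((n - k - 0 + k - 1) / k).toNat else 0 : Nat) : Int) + 1 := by
    split_ifs with h
    · have he : (n - 0 + k - 1) = (n - k - 0 + k - 1) + 1 * k := by ring
      rw [he, Int.add_mul_ediv_right _ _ (by omega)]
      have := Int.ediv_nonneg (a := n - k - 0 + k - 1) (b := k) (by omega) (by omega)
      omega
    · have he : (n - 0 + k - 1) = (n - 1) + 1 * k := by ring
      rw [he, Int.add_mul_ediv_right _ _ (by omega),
          Int.ediv_eq_zero_of_lt (by omega) (by omega)]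
      simp
  have hcn : ((n - 0 + k - 1) / k).toNat = (if 0 < n - k then ((n - k - 0 + k - 1) / k).toNat else 0) + 1 := by
    omega
  rw [hcn, List.range_succ_eq_map]
  simp only [List.map_cons, List.map_map]
  congr 1
  · simp
  · refine List.map_congr_left (fun j _ => ?_)
    simp [Function.comp]
    ring

-- the shifted slice is a slice of the dropped list
lemma slice_shift (xs : List String) (k i : Int) (hk : 0 < k) (hi : 0 ≤ i) :
    PySem.List.slice xs (some (i + k)) (some (i + k + k))
      = PySem.List.slice (xs.drop k.toNat) (some i) (some (i + k)) := by
  rw [PySem.List.slice_toNat _ (by omega) (by omega),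
      PySem.List.slice_toNat _ (by omega) (by omega),
      List.drop_drop]
  have h1 : (i + k).toNat = k.toNat + i.toNat := by omega
  rw [h1]
  congr 1
  omega

-- members of a positive-step range from 0 are nonnegative
lemma pyRange_pos_mem_nonneg (k m i : Int) (hk : 0 < k) (hi : i ∈ PySem.List.pyRange 0 m k) :
    0 ≤ i := by
  rw [PySem.List.pyRange_of_pos _ _ hk] at hi
  obtain ⟨j, _, rfl⟩ := List.mem_map.mp hi
  positivity

-- equation lemmas for the well-founded pvChunks
lemma pvChunks_nil (p : Nat) : pvChunks p [] = [] := by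
  rw [pvChunks.eq_def]

lemma pvChunks_cons (p : Nat) (x : String) (rest : List String) :
    pvChunks p (x :: rest) = ((x :: rest).take (p + 1)) :: pvChunks p ((x :: rest).drop (p + 1)) := by
  rw [pvChunks.eq_def]

-- main bridge: A's flatMap over the index range equals B's flatMap over the chunk list
lemma range_flatMap_eq_chunks (G : List String → List (List String)) (k : Int) (hk : 0 < k) :
    ∀ (N : Nat) (xs : List String), xs.length ≤ N →
      (PySem.List.pyRange 0 (PySem.List.len xs) k).flatMap
          (fun i => G (PySem.List.slice xs (some i) (some (i + k))))
        = (pvChunks (k.toNat - 1) xs).flatMap G := by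
  intro N
  induction N with
  | zero =>
      intro xs hxs
      have hx : xs = [] := List.length_eq_zero_iff.mp (by omega)
      subst hx
      rw [pvChunks_nil]
      simp [pyRange_pos_nil k 0 hk (by omega), PySem.List.len]
  | succ N ih =>
      intro xs hxs
      match xs with
      | [] =>
        rw [pvChunks_nil]
        simp [pyRange_pos_nil k 0 hk (by omega), PySem.List.len]
      | x :: rest =>
        have hlen : (0 : Int) < PySem.List.len (x :: rest) := by
          simp [PySem.List.len]
        rw [pyRange_pos_cons k _ hk hlen]
        have hp1 : k.toNat - 1 + 1 = k.toNat := by omega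
        rw [pvChunks_cons, hp1]
        simp only [List.flatMap_cons, List.flatMap_map]
        congr 1
        · -- head chunk: slice (x::rest) 0 (0+k) = take k.toNat
          congr 1
          rw [zero_add, PySem.List.slice_toNat _ (by omega) (by omega)]
          simp
        · -- tail: shift the slices onto the dropped list
          have hdrop : ((x :: rest).drop k.toNat).length ≤ N := by
            rw [List.length_drop]
            simp only [List.length_cons] at hxs ⊢
            omega
          rw [← ih _ hdrop]
          have hstop : PySem.List.pyRange 0 (PySem.List.len (x :: rest) - k) k
              = PySem.List.pyRange 0 (PySem.List.len ((x :: rest).drop k.toNat)) k := by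
            by_cases hc : PySem.List.len (x :: rest) - k ≤ 0
            · rw [pyRange_pos_nil k _ hk hc]
              have hc2 : PySem.List.len ((x :: rest).drop k.toNat) ≤ 0 := by
                simp [PySem.List.len] at hc ⊢
                omega
              rw [pyRange_pos_nil k _ hk hc2]
            · have heq : PySem.List.len (x :: rest) - k = PySem.List.len ((x :: rest).drop k.toNat) := by
                simp [PySem.List.len] at hc ⊢
                omega
              rw [heq]
          rw [← hstop]
          refine List.flatMap_congr (fun i hi => ?_)
          have h0i : 0 ≤ i := pyRange_pos_mem_nonneg k _ i hk hi
          rw [slice_shift _ k i hk h0i]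

-- ===== VERDICT (by name: the statements are the Claim_ definitions above) =====
theorem rotation_partition_spatial_temporal_spec : Claim_equal_rotation_partition_spatial_temporal := by
  intro farm_names fpc _ hpre
  unfold Spec_rotation_partition_spatial_temporal
  unfold rotation_partition_spatial_temporal rotation_partition_spatial_temporal_alt
  by_cases hk : fpc ≤ 0
  · -- negative step: the index range is empty, B returns []
    rw [if_pos hk]
    have hstep : fpc < 0 := lt_of_le_of_ne hk hpre
    have hnil : PySem.List.pyRange 0 (PySem.List.len farm_names) fpc = [] := by
      unfold PySem.List.pyRange
      rw [if_neg (by omega)]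
      have : ¬ (0 : Int) < fpc := by omega
      rw [if_neg this, if_neg (by simp [PySem.List.len])]
      simp
    rw [hnil]
    simp
  · rw [if_neg hk]
    replace hk : 0 < fpc := by omega
    -- rewrite A's nested foldls into a flatMap over the index range
    have hA : ∀ (l : List Int),
        l.foldl (fun parts i =>
          let cluster := PySem.List.slice farm_names (some i) (some (i + fpc))
          (PySem.List.pyRange 1 (3 + 1) 1).foldl
            (fun parts t =>
              parts ++ [PySem.Set.ofList (cluster.flatMap (fun f =>
                FAMILIES_6.map (fun fam => "Y_" ++ f ++ "_" ++ fam ++ "_t" ++ PySem.Int.toStr t)))])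
            parts) []
        = l.flatMap (fun i =>
            (PySem.List.pyRange 1 (3 + 1) 1).map (fun t =>
              PySem.Set.ofList ((PySem.List.slice farm_names (some i) (some (i + fpc))).flatMap (fun f =>
                FAMILIES_6.map (fun fam => "Y_" ++ f ++ "_" ++ fam ++ "_t" ++ PySem.Int.toStr t))))) := by
      intro l
      have hstep : ∀ (parts : List (List String)) (i : Int),
          (PySem.List.pyRange 1 (3 + 1) 1).foldl
            (fun parts t =>
              parts ++ [PySem.Set.ofList ((PySem.List.slice farm_names (some i) (some (i + fpc))).flatMap (fun f =>
                FAMILIES_6.map (fun fam => "Y_" ++ f ++ "_" ++ fam ++ "_t" ++ PySem.Int.toStr t)))])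
            parts
          = parts ++ (PySem.List.pyRange 1 (3 + 1) 1).map (fun t =>
              PySem.Set.ofList ((PySem.List.slice farm_names (some i) (some (i + fpc))).flatMap (fun f =>
                FAMILIES_6.map (fun fam => "Y_" ++ f ++ "_" ++ fam ++ "_t" ++ PySem.Int.toStr t)))) := by
        intro parts i
        exact PySem.List.foldl_append_singleton_eq_map _ _ _
      calc l.foldl _ [] = l.foldl (fun parts i => parts ++ (PySem.List.pyRange 1 (3 + 1) 1).map (fun t =>
              PySem.Set.ofList ((PySem.List.slice farm_names (some i) (some (i + fpc))).flatMap (fun f =>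
                FAMILIES_6.map (fun fam => "Y_" ++ f ++ "_" ++ fam ++ "_t" ++ PySem.Int.toStr t))))) [] := by
              exact PySem.List.foldl_congr_mem _ _ _ _ (fun parts i _ => hstep parts i)
        _ = _ := PySem.List.foldl_append_eq_flatMap _ _ []
      
    rw [hA]
    exact range_flatMap_eq_chunks
      (fun c => (PySem.List.pyRange 1 (3 + 1) 1).map (fun t =>
        PySem.Set.ofList (c.flatMap (fun f =>
          FAMILIES_6.map (fun fam => "Y_" ++ f ++ "_" ++ fam ++ "_t" ++ PySem.Int.toStr t)))))
      fpc hk farm_names.length farm_names (le_refl _)
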